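-- pv_equiv track=rewrite | github.com/huangjiaroro/tracking-code-web | scripts/review_tracking_implementation.py | strip_code_comments
-- ===== SOURCE A (Python) =====
-- def strip_code_comments(code_text: str) -> str:
--     result: list[str] = []
--     index = 0
--     length = len(code_text)
--     in_single_quote = False
--     in_double_quote = False
--     in_template_string = False
--
--     while index < length:
--         char = code_text[index]
--         next_char = code_text[index + 1] if index + 1 < length else ""
--
--         if in_single_quote:
--             result.append(char)
--             if char == "\\" and index + 1 < length:
--                 result.append(code_text[index + 1])
--                 index += 2
--                 continue
--             if char == "'":
--                 in_single_quote = False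
--             index += 1
--             continue
--
--         if in_double_quote:
--             result.append(char)
--             if char == "\\" and index + 1 < length:
--                 result.append(code_text[index + 1])
--                 index += 2
--                 continue
--             if char == '"':
--                 in_double_quote = False
--             index += 1
--             continue
--
--         if in_template_string:
--             result.append(char)
--             if char == "\\" and index + 1 < length:
--                 result.append(code_text[index + 1])
--                 index += 2
--                 continue
--             if char == "`":
--                 in_template_string = False
--             index += 1
--             continue
--
--         if code_text.startswith("<!--", index):
--             index += 4
--             while index < length and not code_text.startswith("-->", index):
--                 if code_text[index] == "\n":
--                     result.append("\n")
--                 index += 1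
--             if index < length:
--                 index += 3
--             continue
--
--         if char == "/" and next_char == "/":
--             index += 2
--             while index < length and code_text[index] != "\n":
--                 index += 1
--             continue
--
--         if char == "/" and next_char == "*":
--             index += 2
--             while index < length and not (code_text[index] == "*" and index + 1 < length and code_text[index + 1] == "/"):
--                 if code_text[index] == "\n":
--                     result.append("\n")
--                 index += 1
--             if index < length:
--                 index += 2
--             continue
--
--         if char == "'":
--             in_single_quote = True
--             result.append(char)
--             index += 1
--             continue
--
--         if char == '"':
--             in_double_quote = True
--             result.append(char)
--             index += 1
--             continue
--
--         if char == "`":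
--             in_template_string = True
--             result.append(char)
--             index += 1
--             continue
--
--         result.append(char)
--         index += 1
--
--     return "".join(result)
-- ===== SOURCE B (Python) =====
-- def strip_code_comments(code_text: str) -> str:
--     # Tokenizer: consume whole tokens via find/count and slices instead of a
--     # char-by-char state machine with in-string flags.
--     n = len(code_text)
--     out: list[str] = []
--     i = 0
--     while i < n:
--         c = code_text[i]
--         if c in "'\"`":
--             j = i + 1
--             while j < n:
--                 if code_text[j] == "\\":
--                     j += 2
--                 elif code_text[j] == c:
--                     j += 1
--                     break
--                 else:
--                     j += 1
--             out.append(code_text[i:j])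
--             i = j
--         elif code_text.startswith("<!--", i):
--             j = code_text.find("-->", i + 4)
--             end = n if j < 0 else j
--             out.append("\n" * code_text.count("\n", i + 4, end))
--             i = n if j < 0 else j + 3
--         elif code_text.startswith("//", i):
--             j = code_text.find("\n", i + 2)
--             i = n if j < 0 else j
--         elif code_text.startswith("/*", i):
--             j = code_text.find("*/", i + 2)
--             end = n if j < 0 else j
--             out.append("\n" * code_text.count("\n", i + 2, end))
--             i = n if j < 0 else j + 2
--         else:
--             out.append(c)
--             i += 1
--     return "".join(out)
-- ===== Notes on version B (the rewrite author's own statement) =====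
-- stated objective: idiomatic
-- what changed: Replaced the char-by-char state machine with in_single/double/template flags by a whole-token tokenizer: string literals are consumed by an index scan and emitted as one slice, and comments are removed via find()-computed end positions with count('\n') supplying the preserved newlines.
import Mathlib
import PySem

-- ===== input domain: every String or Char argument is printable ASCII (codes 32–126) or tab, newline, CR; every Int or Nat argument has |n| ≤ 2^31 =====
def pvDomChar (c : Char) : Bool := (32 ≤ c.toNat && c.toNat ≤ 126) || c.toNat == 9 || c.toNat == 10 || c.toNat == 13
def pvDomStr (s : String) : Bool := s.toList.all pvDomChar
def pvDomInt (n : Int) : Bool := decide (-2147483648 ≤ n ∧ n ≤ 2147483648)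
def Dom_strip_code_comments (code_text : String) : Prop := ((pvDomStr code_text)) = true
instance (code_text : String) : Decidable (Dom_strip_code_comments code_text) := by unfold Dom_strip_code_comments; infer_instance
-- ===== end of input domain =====

-- B replaces A's char-by-char flag state machine by a whole-token tokenizer (string
-- slices, find-computed comment ends, counted newlines); same output, no speed claim.

-- ===== PORT A =====
-- A's in-string loop (the three identical flag branches, parameterized by the quote
-- char q): append char; on backslash with a following char append it too and skip 2;
-- on the quote char close. Returns (appended chars, remaining input). The Nat
-- argument is fuel (instantiated with the input length) making the recursion
-- structural; it is a totality guard only, never exhausted on the actual calls.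
def strScanA (q : Char) : Nat → List Char → List Char × List Char
  | _, [] => ([], [])
  | 0, _ :: _ => ([], [])
  | fuel + 1, c :: rest =>
    if c = '\\' ∧ rest ≠ [] then
      (c :: rest.take 1 ++ (strScanA q fuel (rest.drop 1)).1, (strScanA q fuel (rest.drop 1)).2)
    else if c = q then ([c], rest)
    else (c :: (strScanA q fuel rest).1, (strScanA q fuel rest).2)

-- A's line-comment inner while: skip until a newline (left in place) or end.
def lineSkipA : List Char → List Char
  | [] => []
  | c :: rest => if c = '\n' then c :: rest else lineSkipA rest

-- A's HTML-comment inner while: collect newlines until "-->" (then skip it) or end.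
def htmlSkipA : List Char → List Char × List Char
  | [] => ([], [])
  | c :: rest =>
    if c = '-' ∧ rest.take 2 = ['-', '>'] then ([], rest.drop 2)
    else ((if c = '\n' then [c] else []) ++ (htmlSkipA rest).1, (htmlSkipA rest).2)

-- A's block-comment inner while: collect newlines until "*/" (then skip it) or end.
def blockSkipA : List Char → List Char × List Char
  | [] => ([], [])
  | c :: rest =>
    if c = '*' ∧ rest.take 1 = ['/'] then ([], rest.drop 1)
    else ((if c = '\n' then [c] else []) ++ (blockSkipA rest).1, (blockSkipA rest).2)

-- A's main while loop (after a quote opens, control immediately enters the flag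
-- branch, factored here as strScanA); branch order as in A. Fuel as above.
def mainA : Nat → List Char → List Char
  | _, [] => []
  | 0, _ :: _ => []
  | fuel + 1, c :: rest =>
    if c = '<' ∧ rest.take 3 = ['!', '-', '-'] then
      (htmlSkipA (rest.drop 3)).1 ++ mainA fuel (htmlSkipA (rest.drop 3)).2
    else if c = '/' ∧ rest.take 1 = ['/'] then
      mainA fuel (lineSkipA (rest.drop 1))
    else if c = '/' ∧ rest.take 1 = ['*'] then
      (blockSkipA (rest.drop 1)).1 ++ mainA fuel (blockSkipA (rest.drop 1)).2
    else if c = '\'' ∨ c = '"' ∨ c = '`' then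
      c :: (strScanA c rest.length rest).1 ++ mainA fuel (strScanA c rest.length rest).2
    else c :: mainA fuel rest

def strip_code_comments (code_text : String) : String :=
  String.ofList (mainA code_text.toList.length code_text.toList)

-- ===== PORT B =====
-- B's string scan: number of chars consumed after the opening quote (j - (i+1));
-- same fuel scheme as above.
def scanBLen (q : Char) : Nat → List Char → Nat
  | _, [] => 0
  | 0, _ :: _ => 0
  | fuel + 1, c :: rest =>
    if c = '\\' then 2 + scanBLen q fuel (rest.drop 1)
    else if c = q then 1
    else 1 + scanBLen q fuel rest

-- B's code_text.find("\n", …): index of the first newline, if any.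
def findNL : List Char → Option Nat
  | [] => none
  | c :: rest => if c = '\n' then some 0 else (findNL rest).map (· + 1)

-- B's code_text.find("*/", …): index of the first "*/", if any.
def find2 : List Char → Option Nat
  | [] => none
  | c :: rest =>
    if c = '*' ∧ rest.take 1 = ['/'] then some 0 else (find2 rest).map (· + 1)

-- B's code_text.find("-->", …): index of the first "-->", if any.
def find3 : List Char → Option Nat
  | [] => none
  | c :: rest =>
    if c = '-' ∧ rest.take 2 = ['-', '>'] then some 0 else (find3 rest).map (· + 1)

-- B's main loop: quote → slice out one whole string literal; comments → jump to the
-- find-computed end, emitting replicate(count '\n') newlines for block/HTML comments.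
def mainB : Nat → List Char → List Char
  | _, [] => []
  | 0, _ :: _ => []
  | fuel + 1, c :: rest =>
    if c = '\'' ∨ c = '"' ∨ c = '`' then
      c :: rest.take (scanBLen c rest.length rest)
        ++ mainB fuel (rest.drop (scanBLen c rest.length rest))
    else if c = '<' ∧ rest.take 3 = ['!', '-', '-'] then
      match find3 (rest.drop 3) with
      | none => List.replicate ((rest.drop 3).count '\n') '\n'
      | some j =>
          List.replicate (((rest.drop 3).take j).count '\n') '\n'
            ++ mainB fuel ((rest.drop 3).drop (j + 3))
    else if c = '/' ∧ rest.take 1 = ['/'] then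
      match findNL (rest.drop 1) with
      | none => []
      | some j => mainB fuel ((rest.drop 1).drop j)
    else if c = '/' ∧ rest.take 1 = ['*'] then
      match find2 (rest.drop 1) with
      | none => List.replicate ((rest.drop 1).count '\n') '\n'
      | some j =>
          List.replicate (((rest.drop 1).take j).count '\n') '\n'
            ++ mainB fuel ((rest.drop 1).drop (j + 2))
    else c :: mainB fuel rest

def strip_code_comments_alt (code_text : String) : String :=
  String.ofList (mainB code_text.toList.length code_text.toList)

-- ===== PRECONDITION & SPEC =====
def Spec_strip_code_comments (code_text : String) (out : String) : Prop := out = strip_code_comments_alt code_text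
instance (code_text : String) (out : String) : Decidable (Spec_strip_code_comments code_text out) := by unfold Spec_strip_code_comments; infer_instance

-- ===== CLAIM (what is proved, stated in full; the proofs are below) =====
def Claim_equal_strip_code_comments : Prop := ∀ (code_text : String), Dom_strip_code_comments code_text → Spec_strip_code_comments code_text (strip_code_comments code_text)

-- ===== LEMMAS AND PROOFS =====

theorem strScan_eq (q : Char) (hq : ¬ q = '\\') :
    ∀ (n : Nat) (l : List Char), l.length ≤ n →
      strScanA q n l = (l.take (scanBLen q n l), l.drop (scanBLen q n l)) := by
  intro n
  induction n with
  | zero =>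
      intro l h
      have hl : l = [] := by cases l with
        | nil => rfl
        | cons c rest => simp at h
      subst hl; simp [strScanA, scanBLen]
  | succ n ih =>
      intro l h
      match l with
      | [] => simp [strScanA, scanBLen]
      | c :: rest =>
        have hr : rest.length ≤ n := by simp at h; omega
        by_cases hb : c = '\\'
        · subst hb
          cases rest with
          | nil => simp [strScanA, scanBLen, hq]
          | cons d t =>
              have ht : t.length ≤ n := by simp at hr; omega
              simp [strScanA, scanBLen, ih t ht, List.take_succ_cons, List.drop_succ_cons,
                show ∀ k : Nat, 2 + k = (k + 1) + 1 from by omega]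
        · by_cases hcq : c = q
          · simp [strScanA, scanBLen, hb, hcq, hq]
          · simp [strScanA, scanBLen, hb, hcq, ih rest hr, List.take_succ_cons,
              List.drop_succ_cons, show ∀ k : Nat, 1 + k = k + 1 from fun k => Nat.add_comm 1 k]

theorem lineSkip_eq (l : List Char) :
    lineSkipA l = l.drop ((findNL l).getD l.length) := by
  induction l with
  | nil => simp [lineSkipA, findNL]
  | cons c rest ih =>
      by_cases h : c = '\n'
      · simp [lineSkipA, findNL, h]
      · cases hf : findNL rest with
        | none => simp [lineSkipA, findNL, h, hf, ih]
        | some j => simp [lineSkipA, findNL, h, hf, ih]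

theorem htmlSkip_none (l : List Char) (h : find3 l = none) :
    htmlSkipA l = (List.replicate (l.count '\n') '\n', []) := by
  induction l with
  | nil => simp [htmlSkipA]
  | cons c rest ih =>
      by_cases hc : c = '-' ∧ rest.take 2 = ['-', '>']
      · simp [find3, hc] at h
      · simp [find3, hc] at h
        by_cases hn : c = '\n' <;>
          simp [htmlSkipA, hc, hn, ih h, List.replicate_succ]

theorem htmlSkip_some (l : List Char) (j : Nat) (h : find3 l = some j) :
    htmlSkipA l = (List.replicate ((l.take j).count '\n') '\n', l.drop (j + 3)) := by
  induction l generalizing j with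
  | nil => simp [find3] at h
  | cons c rest ih =>
      by_cases hc : c = '-' ∧ rest.take 2 = ['-', '>']
      · simp [find3, hc] at h
        subst h
        obtain ⟨rfl, h2⟩ := hc
        have h2' : ∃ t, rest = '-' :: '>' :: t := by
          cases rest with
          | nil => simp at h2
          | cons a s =>
            cases s with
            | nil => simp at h2
            | cons b t =>
              simp [List.take_succ_cons] at h2
              exact ⟨t, by simp [h2.1, h2.2]⟩
        obtain ⟨t, rfl⟩ := h2'
        simp [htmlSkipA]
      · simp [find3, hc] at h
        obtain ⟨j', hj', rfl⟩ := h
        by_cases hn : c = '\n' <;>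
          simp [htmlSkipA, hc, hn, ih j' hj', List.take_succ_cons, List.replicate_succ,
            show ∀ k : Nat, k + 1 + 3 = (k + 3) + 1 from by omega]

theorem blockSkip_none (l : List Char) (h : find2 l = none) :
    blockSkipA l = (List.replicate (l.count '\n') '\n', []) := by
  induction l with
  | nil => simp [blockSkipA]
  | cons c rest ih =>
      by_cases hc : c = '*' ∧ rest.take 1 = ['/']
      · simp [find2, hc] at h
      · simp [find2, hc] at h
        by_cases hn : c = '\n' <;>
          simp [blockSkipA, hc, hn, ih h, List.replicate_succ]

theorem blockSkip_some (l : List Char) (j : Nat) (h : find2 l = some j) :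
    blockSkipA l = (List.replicate ((l.take j).count '\n') '\n', l.drop (j + 2)) := by
  induction l generalizing j with
  | nil => simp [find2] at h
  | cons c rest ih =>
      by_cases hc : c = '*' ∧ rest.take 1 = ['/']
      · simp [find2, hc] at h
        subst h
        obtain ⟨rfl, h2⟩ := hc
        have h2' : ∃ t, rest = '/' :: t := by
          cases rest with
          | nil => simp at h2
          | cons a s => exact ⟨s, by simp [List.take_succ_cons] at h2; simp [h2]⟩
        obtain ⟨t, rfl⟩ := h2'
        simp [blockSkipA]
      · simp [find2, hc] at h
        obtain ⟨j', hj', rfl⟩ := h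
        by_cases hn : c = '\n' <;>
          simp [blockSkipA, hc, hn, ih j' hj', List.take_succ_cons, List.replicate_succ,
            show ∀ k : Nat, k + 1 + 2 = (k + 2) + 1 from by omega]

theorem main_eq_aux : ∀ (n : Nat) (l : List Char), l.length ≤ n → mainA n l = mainB n l := by
  intro n
  induction n with
  | zero =>
      intro l h
      have hl : l = [] := by cases l with
        | nil => rfl
        | cons c rest => simp at h
      subst hl; simp [mainA, mainB]
  | succ n ih =>
      intro l h
      match l with
      | [] => simp [mainA, mainB]
      | c :: rest =>
        have hr : rest.length ≤ n := by simp at h; omega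
        rw [mainA, mainB]
        by_cases h1 : c = '<' ∧ rest.take 3 = ['!', '-', '-']
        · have hq : ¬(c = '\'' ∨ c = '"' ∨ c = '`') := by
            obtain ⟨rfl, -⟩ := h1; simp
          rw [if_pos h1, if_neg hq, if_pos h1]
          cases hf : find3 (rest.drop 3) with
          | none =>
              rw [htmlSkip_none _ hf]
              simp [mainA]
          | some j =>
              rw [htmlSkip_some _ j hf]
              simp only []
              rw [ih ((rest.drop 3).drop (j + 3)) (by simp; omega)]
        · by_cases h2 : c = '/' ∧ rest.take 1 = ['/']
          · have hq : ¬(c = '\'' ∨ c = '"' ∨ c = '`') := by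
              obtain ⟨rfl, -⟩ := h2; simp
            rw [if_neg h1, if_pos h2, if_neg hq, if_neg h1, if_pos h2]
            rw [lineSkip_eq]
            cases hf : findNL (rest.drop 1) with
            | none =>
                simp only [Option.getD_none]
                rw [List.drop_length]
                simp [mainA]
            | some j =>
                simp only [Option.getD_some]
                exact ih ((rest.drop 1).drop j) (by simp; omega)
          · by_cases h3 : c = '/' ∧ rest.take 1 = ['*']
            · have hq : ¬(c = '\'' ∨ c = '"' ∨ c = '`') := by
                obtain ⟨rfl, -⟩ := h3; simp
              rw [if_neg h1, if_neg h2, if_pos h3, if_neg hq, if_neg h1, if_neg h2, if_pos h3]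
              cases hf : find2 (rest.drop 1) with
              | none =>
                  rw [blockSkip_none _ hf]
                  simp [mainA]
              | some j =>
                  rw [blockSkip_some _ j hf]
                  simp only []
                  rw [ih ((rest.drop 1).drop (j + 2)) (by simp; omega)]
            · by_cases hq : c = '\'' ∨ c = '"' ∨ c = '`'
              · have hq' : ¬ c = '\\' := by
                  rcases hq with rfl | rfl | rfl <;> simp
                rw [if_neg h1, if_neg h2, if_neg h3, if_pos hq, if_pos hq]
                rw [strScan_eq c hq' rest.length rest (Nat.le_refl _)]
                simp only []
                rw [ih (rest.drop (scanBLen c rest.length rest)) (by simp; omega)]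
              · rw [if_neg h1, if_neg h2, if_neg h3, if_neg hq, if_neg hq,
                  if_neg h1, if_neg h2, if_neg h3]
                rw [ih rest hr]

-- ===== VERDICT (by name: the statement is the Claim_ definition above) =====
theorem strip_code_comments_spec : Claim_equal_strip_code_comments := by
  intro code_text _
  unfold Spec_strip_code_comments strip_code_comments strip_code_comments_alt
  exact congrArg String.ofList (main_eq_aux _ _ (Nat.le_refl _))
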